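-- pv_equiv track=rewrite | github.com/medezzitouni/Algo | Python/mostOccChars.py | mostOccChars
-- ===== SOURCE A (Python) =====
-- def mostOccChars(phrase):
--     chars = dict()
--     mostOccured = ''
--     for c in phrase:
--         try:
--             chars[c] += 1
--         except KeyError:
--             chars[c] = 1
--         mostOccured = c if chars[c] >= max(chars.values()) else mostOccured
--     return mostOccured
-- ===== SOURCE B (Python) =====
-- def mostOccChars(phrase):
--     items = list(phrase)
--     if not items:
--         return ''
--     counts = {}
--     for c in items:
--         counts[c] = counts.get(c, 0) + 1
--     m = max(counts.values())
--     for c in reversed(items):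
--         if counts[c] == m:
--             return c
-- ===== Notes on version B (the rewrite author's own statement) =====
-- stated objective: faster
-- what changed: B builds the full frequency dict in one counting pass (no running-max update per character), takes the max once, and returns the first max-count character found scanning the phrase in reverse, which reproduces A's last-to-reach-max tiebreak.
import Mathlib
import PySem

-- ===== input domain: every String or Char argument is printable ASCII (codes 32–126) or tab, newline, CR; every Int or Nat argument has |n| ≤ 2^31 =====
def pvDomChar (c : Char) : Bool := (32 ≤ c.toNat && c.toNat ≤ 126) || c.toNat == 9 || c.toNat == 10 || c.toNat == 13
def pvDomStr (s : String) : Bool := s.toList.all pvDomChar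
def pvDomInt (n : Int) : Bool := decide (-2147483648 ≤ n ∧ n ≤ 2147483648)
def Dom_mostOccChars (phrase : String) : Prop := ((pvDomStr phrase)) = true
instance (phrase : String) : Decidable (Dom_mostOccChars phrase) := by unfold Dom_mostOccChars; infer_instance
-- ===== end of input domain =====

-- B replaces A's per-character running-max update (max over the dict values recomputed inside the loop)
-- by one counting pass, one max, and one reverse scan for the first max-count character; objective: faster.


-- ===== PORT A =====
-- one loop over the characters: update the count of c (try/except on KeyError), then
-- mostOccured = c if chars[c] >= max(chars.values()) else mostOccured
-- (max(...) raises on an empty dict in Python; the dict is never empty at that point,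
--  so the `none` branch of max? is unreachable and keeps the old value)
def mostOccChars (phrase : String) : String :=
  (phrase.toList.foldl
    (fun (st : PySem.Dict Char Int × String) c =>
      let chars := match st.1.get? c with
        | some v => st.1.insert c (v + 1)      -- chars[c] += 1
        | none   => st.1.insert c 1            -- except KeyError: chars[c] = 1
      let mostOccured := match PySem.List.max? chars.values (fun v => v) with
        | some m => if chars.getD c 0 ≥ m then String.ofList [c] else st.2
        | none   => st.2
      (chars, mostOccured))
    (PySem.Dict.empty, "")).2

-- ===== PORT B =====
-- count everything once, take the max once, then scan the phrase in reverse for the first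
-- character whose count is the max (Python's fall-off-the-end `None` is unreachable: the
-- max is attained by some character of the list)
def mostOccChars_alt (phrase : String) : String :=
  let items := phrase.toList
  if items.isEmpty then "" else
  let counts := items.foldl (fun d c => d.insert c (d.getD c 0 + 1)) (PySem.Dict.empty : PySem.Dict Char Int)
  let m := (PySem.List.max? counts.values (fun v => v)).getD 0
  match items.reverse.find? (fun c => counts.getD c 0 == m) with
  | some c => String.ofList [c]
  | none   => ""

-- ===== PRECONDITION & SPEC =====
def Spec_mostOccChars (phrase : String) (out : String) : Prop := out = mostOccChars_alt phrase
instance (phrase : String) (out : String) : Decidable (Spec_mostOccChars phrase out) := by unfold Spec_mostOccChars; infer_instance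

-- ===== CLAIM (what is proved, stated in full; the proofs are below) =====
def Claim_equal_mostOccChars : Prop := ∀ (phrase : String), Dom_mostOccChars phrase → Spec_mostOccChars phrase (mostOccChars phrase)

-- ===== LEMMAS AND PROOFS =====

-- B's answer as a function of the character list (the form the induction speaks about)
def pvAlt (l : List Char) : String :=
  match PySem.List.max? (PySem.Dict.counter l).values (fun v => v) with
  | none   => ""
  | some m =>
    match l.reverse.find? (fun c => (PySem.Dict.counter l).getD c 0 == m) with
    | some c => String.ofList [c]
    | none   => ""

-- find? only looks at members
theorem pvFind_congr {l : List Char} {p q : Char → Bool}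
    (h : ∀ x ∈ l, p x = q x) : l.find? p = l.find? q := by
  induction l with
  | nil => rfl
  | cons a t ih =>
    simp only [List.find?]
    rw [h a (by simp)]
    cases q a
    · exact ih (fun x hx => h x (by simp [hx]))
    · rfl

-- the max of the counter's values is the max of the counts of the list's members
theorem pvMax_le {l : List Char} {m : Int}
    (hm : PySem.List.max? (PySem.Dict.counter l).values (fun v => v) = some m) :
    ∀ c ∈ l, (l.count c : Int) ≤ m := by
  intro c hc
  have hv : ((l.count c : Int)) ∈ (PySem.Dict.counter l).values := by
    rw [PySem.Dict.values_eq_map_keys _ (PySem.Dict.nodup_keys_counter l) 0]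
    refine List.mem_map.mpr ⟨c, ?_, ?_⟩
    · rw [PySem.Dict.keys_counter]; exact (PySem.Set.mem_ofList l c).mpr hc
    · exact PySem.Dict.getD_counter l c
  exact PySem.List.max?_isMax hm _ hv

theorem pvMax_mem {l : List Char} {m : Int}
    (hm : PySem.List.max? (PySem.Dict.counter l).values (fun v => v) = some m) :
    ∃ c ∈ l, (l.count c : Int) = m := by
  have hv := PySem.List.max?_mem hm
  rw [PySem.Dict.values_eq_map_keys _ (PySem.Dict.nodup_keys_counter l) 0] at hv
  obtain ⟨c, hc, hval⟩ := List.mem_map.mp hv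
  rw [PySem.Dict.keys_counter, PySem.Set.mem_ofList] at hc
  exact ⟨c, hc, by rw [← hval, PySem.Dict.getD_counter]⟩

theorem pvMax_some (l : List Char) (hl : l ≠ []) :
    ∃ m, PySem.List.max? (PySem.Dict.counter l).values (fun v => v) = some m := by
  cases hv : PySem.List.max? (PySem.Dict.counter l).values (fun v => v) with
  | some m => exact ⟨m, rfl⟩
  | none =>
    exfalso
    rw [PySem.List.max?_eq_none_iff] at hv
    obtain ⟨c, t, rfl⟩ := List.exists_cons_of_ne_nil hl
    have : ((List.count c (c :: t) : Nat) : Int) ∈ (PySem.Dict.counter (c :: t)).values := by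
      rw [PySem.Dict.values_eq_map_keys _ (PySem.Dict.nodup_keys_counter _) 0]
      refine List.mem_map.mpr ⟨c, ?_, PySem.Dict.getD_counter _ c⟩
      rw [PySem.Dict.keys_counter]; exact (PySem.Set.mem_ofList _ c).mpr (by simp)
    rw [hv] at this
    exact absurd this (List.not_mem_nil)

-- characterisation of max: any bound attained by a member IS the max? value
theorem pvMax_unique {l : List Char} {m m' : Int}
    (hm : PySem.List.max? (PySem.Dict.counter l).values (fun v => v) = some m)
    (hle : ∀ c ∈ l, (l.count c : Int) ≤ m') (hmem : ∃ c ∈ l, (l.count c : Int) = m') :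
    m = m' := by
  obtain ⟨c, hc, hcv⟩ := hmem
  obtain ⟨c0, hc0, hc0v⟩ := pvMax_mem hm
  have h1 : m ≤ m' := by rw [← hc0v]; exact hle c0 hc0
  have h2 : m' ≤ m := by rw [← hcv]; exact pvMax_le hm c hc
  omega

-- the try/except counting step equals the insert-with-getD step
theorem pvStep_eq (d : PySem.Dict Char Int) (c : Char) :
    (match d.get? c with
      | some v => d.insert c (v + 1)
      | none   => d.insert c 1) = d.insert c (d.getD c 0 + 1) := by
  cases h : d.get? c with
  | some v => simp [PySem.Dict.getD_eq_get?_getD, h]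
  | none   => simp [PySem.Dict.getD_eq_get?_getD, h]

-- key incremental fact: appending one character updates B's answer exactly like A's running rule
theorem pvAlt_append (l : List Char) (c : Char) {m' : Int}
    (hm' : PySem.List.max? (PySem.Dict.counter (l ++ [c])).values (fun v => v) = some m') :
    pvAlt (l ++ [c]) =
      (if ((l ++ [c]).count c : Int) ≥ m' then String.ofList [c] else pvAlt l) := by
  unfold pvAlt
  rw [hm']
  by_cases hge : ((l ++ [c]).count c : Int) ≥ m'
  · -- c's new count equals the new max, so the reverse scan hits c first
    have hle := pvMax_le hm' c (by simp)
    have hge' := hge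
    simp [List.count_append] at hle hge'
    have hcc : ((List.count c l : Int) + 1) = m' := by omega
    rw [if_pos hge, List.reverse_append]
    simp [hcc]
  · -- c's new count is below the max: the max comes from l, and the scan skips c
    simp only [hge, if_false]
    have hcnew : ((l ++ [c]).count c : Int) < m' := by omega
    have hcount_ne : ∀ x ∈ l, x ≠ c → (l ++ [c]).count x = l.count x := by
      intro x _ hx; simp [List.count_append, Ne.symm hx]
    have hccount : (l ++ [c]).count c = l.count c + 1 := by simp [List.count_append]
    -- the witness of the new max is not c, hence lies in l with unchanged count
    obtain ⟨w, hw, hwv⟩ := pvMax_mem hm'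
    have hwne : w ≠ c := by intro h; rw [h] at hwv; omega
    have hwl : w ∈ l := by
      rcases List.mem_append.mp hw with h | h
      · exact h
      · simp at h; exact absurd h hwne
    -- m' is also the max over l
    have hl_ne : l ≠ [] := by rintro rfl; simp at hwl
    obtain ⟨m0, hm0⟩ := pvMax_some l hl_ne
    have hle_l : ∀ x ∈ l, (l.count x : Int) ≤ m' := by
      intro x hx
      by_cases hxc : x = c
      · rw [hxc]; omega
      · rw [← hcount_ne x hx hxc]; exact pvMax_le hm' x (by simp [List.mem_append, hx])
    have hmem_l : ∃ x ∈ l, (l.count x : Int) = m' :=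
      ⟨w, hwl, by rw [← hwv, hcount_ne w hwl hwne]⟩
    have hm0m' : m0 = m' := pvMax_unique hm0 hle_l hmem_l
    rw [hm0, hm0m']
    -- the reverse scan over l ++ [c] first tests c (fails) and then agrees with the scan over l
    have hcfail : ((PySem.Dict.counter (l ++ [c])).getD c 0 == m') = false := by
      rw [PySem.Dict.getD_counter]; exact beq_eq_false_iff_ne.mpr (by omega)
    rw [List.reverse_append]
    simp only [List.reverse_singleton, List.singleton_append, List.find?, hcfail]
    have hpred : ∀ x ∈ l.reverse,
        ((PySem.Dict.counter (l ++ [c])).getD x 0 == m') =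
        ((PySem.Dict.counter l).getD x 0 == m') := by
      intro x hx
      rw [List.mem_reverse] at hx
      by_cases hxc : x = c
      · rw [hxc, PySem.Dict.getD_counter, PySem.Dict.getD_counter]
        have h1 : (((l ++ [c]).count c : Int) == m') = false :=
          beq_eq_false_iff_ne.mpr (by omega)
        have h2 : ((l.count c : Int) == m') = false :=
          beq_eq_false_iff_ne.mpr (by omega)
        rw [h1, h2]
      · rw [PySem.Dict.getD_counter, PySem.Dict.getD_counter, hcount_ne x hx hxc]
    rw [pvFind_congr hpred]

-- loop invariant for A: after any prefix the dict is the counter and the string is B's answer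
theorem pvLoopA (l : List Char) :
    (l.foldl
      (fun (st : PySem.Dict Char Int × String) c =>
        let chars := match st.1.get? c with
          | some v => st.1.insert c (v + 1)
          | none   => st.1.insert c 1
        let mostOccured := match PySem.List.max? chars.values (fun v => v) with
          | some m => if chars.getD c 0 ≥ m then String.ofList [c] else st.2
          | none   => st.2
        (chars, mostOccured))
      (PySem.Dict.empty, ""))
    = (PySem.Dict.counter l, pvAlt l) := by
  induction l using List.reverseRecOn with
  | nil => rfl
  | append_singleton l c ih =>
    rw [List.foldl_append, ih]
    simp only [List.foldl_cons, List.foldl_nil]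
    have hdict : (match (PySem.Dict.counter l).get? c with
        | some v => (PySem.Dict.counter l).insert c (v + 1)
        | none   => (PySem.Dict.counter l).insert c 1) = PySem.Dict.counter (l ++ [c]) := by
      rw [pvStep_eq]
      have := PySem.Dict.foldl_insert_getD_add_one_eq_counter (l ++ [c])
      rw [List.foldl_append] at this
      simpa [PySem.Dict.foldl_insert_getD_add_one_eq_counter l] using this
    simp only [hdict]
    obtain ⟨m', hm'⟩ := pvMax_some (l ++ [c]) (by simp)
    rw [hm', pvAlt_append l c hm', PySem.Dict.getD_counter]

-- B on a string equals pvAlt on its character list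
theorem pvAlt_eq (phrase : String) : mostOccChars_alt phrase = pvAlt phrase.toList := by
  cases hl : phrase.toList with
  | nil =>
    simp only [mostOccChars_alt, pvAlt, hl]
    rfl
  | cons a t =>
    obtain ⟨m, hm⟩ := pvMax_some (a :: t) (by simp)
    simp only [mostOccChars_alt, pvAlt, hl, List.isEmpty_cons, Bool.false_eq_true, if_false]
    simp only [PySem.Dict.foldl_insert_getD_add_one_eq_counter, hm, Option.getD_some]

-- ===== VERDICT (by name: the statement is the Claim_ definition above) =====
theorem mostOccChars_spec : Claim_equal_mostOccChars := by
  intro phrase _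
  unfold Spec_mostOccChars mostOccChars
  rw [pvLoopA, pvAlt_eq]
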